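-- pv_equiv track=rewrite | github.com/h-ram/freecodecamp | Daily Challanges/2026-02-February/2026-02-14.py | get_difficulty
-- ===== SOURCE A (Python) =====
-- def get_difficulty(track):
--     points = 0
--     prev_curve = None
--
--     for curve in track:
--         if curve in "LR":
--             if prev_curve and prev_curve != curve:
--                 points += 15
--             else:
--                 points += 5
--             prev_curve = curve
--
--     # Had to cheat here, the testing is broken.
--     if points <= 100 or points == 170 or points == 110:
--         return "Easy"
--     elif points <= 200:
--         return "Medium"
--     else:
--         return "Hard"
-- ===== SOURCE B (Python) =====
-- def get_difficulty(track):
--     curves = [c for c in track if c in "LR"]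
--     points = 5 * len(curves) + 10 * sum(1 for a, b in zip(curves, curves[1:]) if a != b)
--
--     if points <= 100 or points == 170 or points == 110:
--         return "Easy"
--     elif points <= 200:
--         return "Medium"
--     else:
--         return "Hard"
-- ===== Notes on version B (the rewrite author's own statement) =====
-- stated objective: simpler
-- what changed: Replaced the stateful prev_curve/points accumulator loop by a closed-form score: filter the curves once, then points = 5*len(curves) + 10*(number of adjacent differing pairs); classification cascade unchanged.
import Mathlib
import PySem

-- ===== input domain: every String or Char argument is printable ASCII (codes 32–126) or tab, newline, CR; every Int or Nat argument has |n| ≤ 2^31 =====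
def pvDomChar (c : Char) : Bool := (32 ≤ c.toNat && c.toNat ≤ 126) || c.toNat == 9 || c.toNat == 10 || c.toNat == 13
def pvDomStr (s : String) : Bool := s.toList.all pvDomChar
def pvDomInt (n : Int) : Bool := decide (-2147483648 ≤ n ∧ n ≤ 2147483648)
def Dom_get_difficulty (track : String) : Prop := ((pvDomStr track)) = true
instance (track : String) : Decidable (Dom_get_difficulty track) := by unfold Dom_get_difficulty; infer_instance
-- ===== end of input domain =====

-- B replaces A's stateful prev_curve accumulator loop by a closed-form score
-- (5 per curve + 10 per adjacent differing curve pair); objective: simpler.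


-- ===== PORT A =====
-- one loop iteration of A: state = (points, prev_curve)
def stepA (st : Int × Option Char) (curve : Char) : Int × Option Char :=
  if ("LR".toList.contains curve) then
    match st.2 with
    | some pc => if pc ≠ curve then (st.1 + 15, some curve) else (st.1 + 5, some curve)
    | none => (st.1 + 5, some curve)
  else st

def get_difficulty (track : String) : String :=
  let st := track.toList.foldl stepA (0, none)
  let points := st.1
  if points ≤ 100 ∨ points = 170 ∨ points = 110 then "Easy"
  else if points ≤ 200 then "Medium"
  else "Hard"

-- ===== PORT B =====
def get_difficulty_alt (track : String) : String :=
  let curves := track.toList.filter (fun c => "LR".toList.contains c)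
  let trans := ((curves.zip curves.tail).filter (fun p => p.1 ≠ p.2)).length
  let points : Int := 5 * (curves.length : Int) + 10 * (trans : Int)
  if points ≤ 100 ∨ points = 170 ∨ points = 110 then "Easy"
  else if points ≤ 200 then "Medium"
  else "Hard"

-- ===== PRECONDITION & SPEC =====
def Spec_get_difficulty (track : String) (out : String) : Prop := out = get_difficulty_alt track
instance (track : String) (out : String) : Decidable (Spec_get_difficulty track out) := by unfold Spec_get_difficulty; infer_instance

-- ===== CLAIM (what is proved, stated in full; the proofs are below) =====
def Claim_equal_get_difficulty : Prop := ∀ (track : String), Dom_get_difficulty track → Spec_get_difficulty track (get_difficulty track)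

-- ===== LEMMAS AND PROOFS =====

def transCount (l : List Char) : Nat :=
  ((l.zip l.tail).filter (fun p => p.1 ≠ p.2)).length

lemma transCount_cons (c d : Char) (cs : List Char) :
    transCount (c :: d :: cs) = (if c = d then 0 else 1) + transCount (d :: cs) := by
  by_cases h : c = d <;> simp [transCount, h, Nat.add_comm]

lemma stepA_skip (st : Int × Option Char) (c : Char)
    (h : ("LR".toList.contains c) = false) : stepA st c = st := by
  unfold stepA; rw [h]; simp

lemma stepA_none (p : Int) (c : Char)
    (h : ("LR".toList.contains c) = true) : stepA (p, none) c = (p + 5, some c) := by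
  unfold stepA; rw [h]; simp

lemma stepA_some (p : Int) (pc c : Char)
    (h : ("LR".toList.contains c) = true) :
    stepA (p, some pc) c = if pc = c then (p + 5, some c) else (p + 15, some c) := by
  unfold stepA; rw [h]; by_cases hpc : pc = c <;> simp [hpc]

-- A's loop skips non-curve characters, so folding over l equals folding over the filtered list
lemma fold_filter (l : List Char) (st : Int × Option Char) :
    l.foldl stepA st = (l.filter (fun c => "LR".toList.contains c)).foldl stepA st := by
  induction l generalizing st with
  | nil => rfl
  | cons c cs ih =>
    by_cases h : ("LR".toList.contains c) = true
    · rw [List.foldl_cons, List.filter_cons, if_pos h, List.foldl_cons]; exact ih _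
    · rw [List.foldl_cons, stepA_skip _ _ (by simpa using h), List.filter_cons, if_neg h]
      exact ih _

-- closed form of the loop over a list of curves, starting after the first curve
lemma fold_closed (cs : List Char) (c : Char) (p : Int)
    (h : ∀ x ∈ cs, ("LR".toList.contains x) = true) :
    (cs.foldl stepA (p, some c)).1
      = p + 5 * (cs.length : Int) + 10 * (transCount (c :: cs) : Int) := by
  induction cs generalizing c p with
  | nil => simp [transCount]
  | cons d cs ih =>
    have hd : ("LR".toList.contains d) = true := h d (by simp)
    have hcs : ∀ x ∈ cs, ("LR".toList.contains x) = true := fun x hx => h x (by simp [hx])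
    rw [List.foldl_cons, stepA_some p c d hd, transCount_cons]
    by_cases hcd : c = d
    · rw [if_pos hcd, if_pos hcd, ih d _ hcs]; push_cast [List.length_cons]; ring
    · rw [if_neg hcd, if_neg hcd, ih d _ hcs]; push_cast [List.length_cons]; ring

-- ===== VERDICT (by name: the statement is the Claim_ definition above) =====
theorem get_difficulty_spec : Claim_equal_get_difficulty := by
  intro track _
  unfold Spec_get_difficulty get_difficulty get_difficulty_alt
  have hpts : (track.toList.foldl stepA (0, none)).1
      = 5 * (((track.toList.filter (fun c => "LR".toList.contains c)).length : Int))
        + 10 * (((((track.toList.filter (fun c => "LR".toList.contains c)).zip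
            (track.toList.filter (fun c => "LR".toList.contains c)).tail).filter
            (fun p => p.1 ≠ p.2)).length : Int)) := by
    rw [fold_filter]
    generalize hcs : track.toList.filter (fun c => "LR".toList.contains c) = cs
    have hall : ∀ x ∈ cs, ("LR".toList.contains x) = true := by
      intro x hx; rw [← hcs] at hx; exact (List.mem_filter.mp hx).2
    cases cs with
    | nil => simp
    | cons c rest =>
      have hrest : ∀ x ∈ rest, ("LR".toList.contains x) = true :=
        fun x hx => hall x (by simp [hx])
      rw [List.foldl_cons, stepA_none 0 c (hall c (by simp)), fold_closed rest c (0 + 5) hrest]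
      simp [transCount]
      ring
  simp only [hpts]
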